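-- pv_equiv track=rewrite | github.com/RomB29/Advent_of_code | 2024/Day_14/14.py | count_robots
-- ===== SOURCE A (Python) =====
-- def count_robots(rx, ry, p):
--     count = 0
--     for index, (x, y) in enumerate(p):
--         for x in rx:
--             for y in ry:
--                 if p[index][0] == x and p[index][1] == y:
--                     count += 1
--     return count
-- ===== SOURCE B (Python) =====
-- def count_robots(rx, ry, p):
--     cx = {}
--     for x in rx:
--         cx[x] = cx.get(x, 0) + 1
--     cy = {}
--     for y in ry:
--         cy[y] = cy.get(y, 0) + 1
--     total = 0
--     for x, y in p:
--         total += cx.get(x, 0) * cy.get(y, 0)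
--     return total
-- ===== Notes on version B (the rewrite author's own statement) =====
-- stated objective: faster
-- what changed: Replaces A's triple nested loop (rescanning rx and ry for every robot) with two frequency tables built once and a single pass over p adding cx[x]*cy[y].
import Mathlib
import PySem

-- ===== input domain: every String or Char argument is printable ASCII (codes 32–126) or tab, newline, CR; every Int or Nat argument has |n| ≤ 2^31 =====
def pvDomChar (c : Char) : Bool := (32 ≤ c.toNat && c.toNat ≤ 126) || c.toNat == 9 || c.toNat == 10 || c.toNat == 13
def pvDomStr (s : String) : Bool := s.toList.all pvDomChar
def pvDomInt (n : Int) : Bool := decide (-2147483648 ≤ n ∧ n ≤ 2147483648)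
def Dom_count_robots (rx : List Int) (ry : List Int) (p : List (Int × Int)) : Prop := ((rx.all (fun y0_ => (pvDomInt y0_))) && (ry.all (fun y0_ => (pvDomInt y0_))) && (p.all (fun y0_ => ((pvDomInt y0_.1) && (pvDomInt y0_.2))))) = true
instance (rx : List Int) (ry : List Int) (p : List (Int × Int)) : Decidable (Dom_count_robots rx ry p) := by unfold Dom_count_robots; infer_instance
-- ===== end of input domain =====

-- B replaces A's triple nested loop by two frequency dicts built once and one pass over p (asymptotically faster).

-- ===== PORT A =====
-- Literal port of A: for index,(x,y) in enumerate(p): for x in rx: for y in ry: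
-- if p[index][0]==x and p[index][1]==y: count += 1.  The loop variables x,y are
-- immediately shadowed by the inner loops, so only the index is used; p[index] is
-- always in range (index comes from enumerate), so pyGetD's default is never read.
def count_robots (rx : List Int) (ry : List Int) (p : List (Int × Int)) : Int :=
  (PySem.List.enumerate p 0).foldl (fun count pr =>
    rx.foldl (fun count x =>
      ry.foldl (fun count y =>
        if (PySem.List.pyGetD p pr.1 (0, 0)).1 = x ∧ (PySem.List.pyGetD p pr.1 (0, 0)).2 = y
        then count + 1 else count) count) count) 0

-- ===== PORT B =====
-- Literal port of Source B: build cx and cy as counter dicts, then one pass over p.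
def count_robots_alt (rx : List Int) (ry : List Int) (p : List (Int × Int)) : Int :=
  let cx : PySem.Dict Int Int := rx.foldl (fun d x => d.insert x (d.getD x 0 + 1)) PySem.Dict.empty
  let cy : PySem.Dict Int Int := ry.foldl (fun d y => d.insert y (d.getD y 0 + 1)) PySem.Dict.empty
  p.foldl (fun total xy => total + cx.getD xy.1 0 * cy.getD xy.2 0) 0

-- ===== PRECONDITION & SPEC =====
def Spec_count_robots (rx : List Int) (ry : List Int) (p : List (Int × Int)) (out : Int) : Prop := out = count_robots_alt rx ry p
instance (rx : List Int) (ry : List Int) (p : List (Int × Int)) (out : Int) : Decidable (Spec_count_robots rx ry p out) := by unfold Spec_count_robots; infer_instance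

-- ===== CLAIM (what is proved, stated in full; the proofs are below) =====
def Claim_equal_count_robots : Prop := ∀ (rx : List Int) (ry : List Int) (p : List (Int × Int)), Dom_count_robots rx ry p → Spec_count_robots rx ry p (count_robots rx ry p)

-- ===== LEMMAS AND PROOFS =====

-- bounds on the index carried by `enumerate p s`
theorem enum_fst_bounds {α : Type} (p : List α) (s : Int) {i : Int} {v : α}
    (h : (i, v) ∈ PySem.List.enumerate p s) : s ≤ i ∧ i < s + p.length := by
  have : i ∈ (PySem.List.enumerate p s).map (fun x => x.1) := List.mem_map_of_mem h
  rw [PySem.List.map_fst_enumerate] at this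
  exact PySem.List.mem_pyRange_one.mp this

-- the enumerated element is the list element at the offset index
theorem enum_getElem? {α : Type} (p : List α) (s : Int) {i : Int} {v : α}
    (h : (i, v) ∈ PySem.List.enumerate p s) : p[(i - s).toNat]? = some v := by
  induction p generalizing s with
  | nil => simp [PySem.List.enumerate_nil] at h
  | cons a t ih =>
    rw [PySem.List.enumerate_cons] at h
    rcases List.mem_cons.mp h with h | h
    · obtain ⟨hi, hv⟩ := Prod.mk.inj h
      subst hi; subst hv
      simp
    · have hs : s + 1 ≤ i := (enum_fst_bounds t (s + 1) h).1
      have ht := ih (s + 1) h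
      have h1 : (i - s).toNat = (i - (s + 1)).toNat + 1 := by omega
      rw [h1, List.getElem?_cons_succ]
      exact ht

-- p[i] recovers the enumerated element (start 0)
theorem enum_getD (p : List (Int × Int)) {i : Int} {v : Int × Int} (d : Int × Int)
    (h : (i, v) ∈ PySem.List.enumerate p 0) : PySem.List.pyGetD p i d = v := by
  have hb := enum_fst_bounds p 0 h
  have hg := enum_getElem? p 0 h
  rw [sub_zero] at hg
  rw [PySem.List.pyGetD_eq_getElem p d hb.1 (by omega)]
  have : p[i.toNat]? = some v := by simpa using hg
  exact (List.getElem?_eq_some_iff.mp this).2 ▸ rfl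

-- the innermost loop over ry
theorem inner_ry (ry : List Int) (a x b : Int) (c : Int) :
    ry.foldl (fun c y => if a = x ∧ b = y then c + 1 else c) c
      = c + if a = x then (ry.count b : Int) else 0 := by
  induction ry generalizing c with
  | nil => simp
  | cons y t ih =>
    rw [List.foldl_cons, ih, List.count_cons]
    by_cases hx : a = x <;> by_cases hb : b = y
    · simp [hx, hb]; ring
    · have hb' : ¬y = b := fun h => hb h.symm
      simp [hx, hb, hb']
    · simp [hx, hb]
    · simp [hx, hb]

-- the two inner loops: contribution of one robot (a, b)
theorem per_robot (rx ry : List Int) (a b : Int) (c : Int) :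
    rx.foldl (fun c x =>
      ry.foldl (fun c y => if a = x ∧ b = y then c + 1 else c) c) c
      = c + (rx.count a : Int) * (ry.count b : Int) := by
  induction rx generalizing c with
  | nil => simp
  | cons x t ih =>
    rw [List.foldl_cons, ih, inner_ry, List.count_cons]
    by_cases hx : a = x
    · have hx' : (x == a) = true := by simp [hx.symm]
      simp [hx]; ring
    · have hx' : (x == a) = false := by simp; exact fun h => hx h.symm
      simp [hx, hx']

-- ===== VERDICT (by name: the statement is the Claim_ definition above) =====
theorem count_robots_spec : Claim_equal_count_robots := by
  intro rx ry p _
  show count_robots rx ry p = count_robots_alt rx ry p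
  unfold count_robots count_robots_alt
  simp only [PySem.Dict.foldl_insert_getD_add_one_eq_counter]
  -- A side: replace p[pr.1] by pr.2 and fold per-robot contributions
  rw [PySem.List.foldl_congr_mem _ _
      (fun count pr => count + ((rx.count pr.2.1 : Int) * (ry.count pr.2.2 : Int))) 0
      (by
        intro acc pr hpr
        obtain ⟨i, v⟩ := pr
        rw [enum_getD p ((0 : Int), (0 : Int)) hpr]
        exact per_robot rx ry v.1 v.2 acc)]
  -- fold over enumerate using only .2 = fold over p
  have hmap := @List.foldl_map (Int × (Int × Int)) (Int × Int) Int (fun x => x.2)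
      (fun total xy => total + (rx.count xy.1 : Int) * (ry.count xy.2 : Int))
      (PySem.List.enumerate p 0) 0
  rw [PySem.List.map_snd_enumerate] at hmap
  rw [← hmap]
  -- B side: counter lookups are list counts
  exact (PySem.List.foldl_congr_mem _ _ _ 0 (by
    intro acc xy _
    simp [PySem.Dict.getD_counter]))
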